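-- pv_equiv track=rewrite | github.com/wsethbrown/NeverEndingQuest | adv_summary.py | trim_conversation
-- ===== SOURCE A (Python) =====
-- def trim_conversation(summary_dump):
--     trimmed_data = summary_dump[:3]
--     relevant_messages = summary_dump[3:] # Messages after the initial system/user setup
--
--     # Find the last 'Location transition:' message if any
--     last_transition_index = -1
--     for i, message in enumerate(relevant_messages):
--         if message.get('role') == 'user' and 'Location transition:' in message.get('content', ''):
--             last_transition_index = i
--
--     # Start summarizing from after the last transition, or from the beginning of relevant messages
--     start_summarize_from_index = last_transition_index + 1 if last_transition_index != -1 else 0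
--     messages_to_consider_for_summary = relevant_messages[start_summarize_from_index:]
--
--     # Find the first assistant message in this considered segment
--     first_assistant_index_in_segment = -1
--     for i, message in enumerate(messages_to_consider_for_summary):
--         if message.get('role') == 'assistant':
--             first_assistant_index_in_segment = i
--             break
--
--     if first_assistant_index_in_segment != -1:
--         # Take messages from the first assistant message onwards in this segment
--         final_messages_for_dialogue = messages_to_consider_for_summary[first_assistant_index_in_segment:]
--     else:
--         # If no assistant message in the segment (e.g., only user messages after last transition),
--         # then summarize what's available in that segment.
--         final_messages_for_dialogue = messages_to_consider_for_summary
--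
--     trimmed_data.extend(final_messages_for_dialogue)
--     return trimmed_data
-- ===== SOURCE B (Python) =====
-- def trim_conversation(summary_dump):
--     relevant = summary_dump[3:]
--     last_transition = -1
--     first_assistant = None
--     for i, message in enumerate(relevant):
--         if message.get('role') == 'user' and 'Location transition:' in message.get('content', ''):
--             last_transition = i
--             first_assistant = None
--         elif message.get('role') == 'assistant' and first_assistant is None:
--             first_assistant = i
--     if first_assistant is not None:
--         start = first_assistant
--     elif last_transition != -1:
--         start = last_transition + 1
--     else:
--         start = 0
--     return summary_dump[:3] + relevant[start:]
-- ===== Notes on version B (the rewrite author's own statement) =====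
-- stated objective: simpler
-- what changed: Replaces A's two forward scans plus intermediate slicing (find last transition, slice, find first assistant in the slice, slice again) with ONE pass over summary_dump[3:] maintaining (last_transition, first_assistant-after-it), then a single final slice.
import Mathlib
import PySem

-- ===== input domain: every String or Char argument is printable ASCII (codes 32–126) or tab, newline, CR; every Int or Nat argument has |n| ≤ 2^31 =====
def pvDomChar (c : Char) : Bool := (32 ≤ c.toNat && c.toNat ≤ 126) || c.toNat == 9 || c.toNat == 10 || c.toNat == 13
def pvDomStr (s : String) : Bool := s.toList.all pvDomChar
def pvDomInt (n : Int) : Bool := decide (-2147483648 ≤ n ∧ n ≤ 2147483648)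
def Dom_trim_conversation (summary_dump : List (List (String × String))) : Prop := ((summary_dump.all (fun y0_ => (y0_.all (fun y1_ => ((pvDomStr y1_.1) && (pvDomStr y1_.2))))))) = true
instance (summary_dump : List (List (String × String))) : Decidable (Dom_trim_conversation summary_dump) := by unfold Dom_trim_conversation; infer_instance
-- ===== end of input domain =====

-- B is a single pass over summary_dump[3:] maintaining (last transition index, first assistant after it)
-- instead of A's two scans with intermediate slices; simpler, same O(n) cost.

-- shared primitive: dict.get on the association list (first match), as in Python
def pvGet? (m : List (String × String)) (k : String) : Option String :=
  match m with
  | [] => none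
  | (k', v) :: t => if k' == k then some v else pvGet? t k

-- message.get('role') == 'user' and 'Location transition:' in message.get('content', '')
def pvIsTrans (m : List (String × String)) : Bool :=
  (pvGet? m "role" == some "user") &&
    PySem.Str.isIn "Location transition:" ((pvGet? m "content").getD "")

-- message.get('role') == 'assistant'
def pvIsAssist (m : List (String × String)) : Bool :=
  pvGet? m "role" == some "assistant"

-- ===== PORT A =====
-- A's second loop: first assistant index (break = return), -1 if none
def pvFirstAssistLoop (l : List (Int × List (String × String))) : Int :=
  match l with
  | [] => -1
  | (i, m) :: t => if pvIsAssist m then i else pvFirstAssistLoop t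

def trim_conversation (summary_dump : List (List (String × String))) : List (List (String × String)) :=
  let trimmed_data := PySem.List.slice summary_dump none (some 3)
  let relevant_messages := PySem.List.slice summary_dump (some 3) none
  let last_transition_index :=
    (PySem.List.enumerate relevant_messages 0).foldl
      (fun acc p => if pvIsTrans p.2 then p.1 else acc) (-1 : Int)
  let start_summarize_from_index : Int :=
    if last_transition_index ≠ -1 then last_transition_index + 1 else 0
  let messages_to_consider := PySem.List.slice relevant_messages (some start_summarize_from_index) none
  let first_assistant_index_in_segment :=
    pvFirstAssistLoop (PySem.List.enumerate messages_to_consider 0)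
  let final_messages :=
    if first_assistant_index_in_segment ≠ -1 then
      PySem.List.slice messages_to_consider (some first_assistant_index_in_segment) none
    else messages_to_consider
  trimmed_data ++ final_messages

-- ===== PORT B =====
-- B's single-pass state update
def pvStepB (st : Int × Option Int) (p : Int × List (String × String)) : Int × Option Int :=
  if pvIsTrans p.2 then (p.1, none)
  else if pvIsAssist p.2 && st.2 == none then (st.1, some p.1)
  else st

def trim_conversation_alt (summary_dump : List (List (String × String))) : List (List (String × String)) :=
  let relevant := PySem.List.slice summary_dump (some 3) none
  let st := (PySem.List.enumerate relevant 0).foldl pvStepB ((-1 : Int), (none : Option Int))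
  let start : Int :=
    match st.2 with
    | some j => j
    | none => if st.1 ≠ -1 then st.1 + 1 else 0
  PySem.List.slice summary_dump none (some 3) ++ PySem.List.slice relevant (some start) none

-- ===== PRECONDITION & SPEC =====
def Spec_trim_conversation (summary_dump : List (List (String × String))) (out : List (List (String × String))) : Prop := out = trim_conversation_alt summary_dump
instance (summary_dump : List (List (String × String))) (out : List (List (String × String))) : Decidable (Spec_trim_conversation summary_dump out) := by unfold Spec_trim_conversation; infer_instance

-- ===== CLAIM (what is proved, stated in full; the proofs are below) =====
def Claim_equal_trim_conversation : Prop := ∀ (summary_dump : List (List (String × String))), Dom_trim_conversation summary_dump → Spec_trim_conversation summary_dump (trim_conversation summary_dump)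

-- ===== LEMMAS AND PROOFS =====

-- proof-side abbreviations over the 'relevant' list xs
def pvL (xs : List (List (String × String))) : Int :=
  (PySem.List.enumerate xs 0).foldl (fun acc p => if pvIsTrans p.2 then p.1 else acc) (-1 : Int)

def pvF (xs : List (List (String × String))) : Option Int :=
  (xs.drop (pvL xs + 1).toNat).findIdx? pvIsAssist |>.map (fun k => pvL xs + 1 + (k : Int))

theorem pvL_append (xs : List (List (String × String))) (x : List (String × String)) :
    pvL (xs ++ [x]) = if pvIsTrans x then (xs.length : Int) else pvL xs := by
  simp [pvL, PySem.List.enumerate_append, PySem.List.enumerate_cons, PySem.List.enumerate_nil]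

theorem pvL_bounds (xs : List (List (String × String))) :
    -1 ≤ pvL xs ∧ pvL xs < (xs.length : Int) + 1 ∧ (pvL xs ≠ -1 → pvL xs < (xs.length : Int)) := by
  induction xs using List.reverseRecOn with
  | nil => simp [pvL, PySem.List.enumerate_nil]
  | append_singleton xs x ih =>
    rw [pvL_append]
    rcases ih with ⟨h1, h2, h3⟩
    by_cases ht : pvIsTrans x
    · simp only [ht, if_true, List.length_append, List.length_cons, List.length_nil]
      push_cast
      omega
    · simp only [ht, if_false, Bool.false_eq_true, List.length_append, List.length_cons,
        List.length_nil]
      push_cast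
      exact ⟨h1, by omega, fun _ => by omega⟩

theorem pvMB_eq (xs : List (List (String × String))) :
    (PySem.List.enumerate xs 0).foldl pvStepB ((-1 : Int), (none : Option Int)) = (pvL xs, pvF xs) := by
  induction xs using List.reverseRecOn with
  | nil => simp [pvL, pvF, PySem.List.enumerate_nil]
  | append_singleton xs x ih =>
    obtain ⟨hL1, hL2, hL3⟩ := pvL_bounds xs
    have hle : (pvL xs + 1).toNat ≤ xs.length := by
      rcases eq_or_ne (pvL xs) (-1) with h | h
      · simp [h]
      · have := hL3 h; omega
    rw [PySem.List.enumerate_append, List.foldl_append, ih, PySem.List.enumerate_cons,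
      PySem.List.enumerate_nil]
    simp only [List.foldl_cons, List.foldl_nil, pvStepB, pvL_append]
    by_cases ht : pvIsTrans x
    · simp only [ht, if_pos trivial]
      have : pvF (xs ++ [x]) = none := by
        have hdrop : (xs ++ [x]).drop ((xs.length : Int) + 1).toNat = [] := by
          have : ((xs.length : Int) + 1).toNat = xs.length + 1 := by omega
          rw [this]
          apply List.drop_eq_nil_of_le
          simp
        simp [pvF, pvL_append, ht]
      simp [this]
    · have hdrop : (xs ++ [x]).drop (pvL xs + 1).toNat
          = xs.drop (pvL xs + 1).toNat ++ [x] :=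
        List.drop_append_of_le_length hle
      have hL' : pvL (xs ++ [x]) = pvL xs := by rw [pvL_append]; simp [ht]
      have hFapp : pvF (xs ++ [x]) =
          (((xs.drop (pvL xs + 1).toNat).findIdx? pvIsAssist).or
            ((List.findIdx? pvIsAssist [x]).map
              (fun i => i + (xs.drop (pvL xs + 1).toNat).length))).map
            (fun k => pvL xs + 1 + (k : Int)) := by
        rw [pvF, hL', hdrop, List.findIdx?_append]
      have hdl : ((xs.drop (pvL xs + 1).toNat).length : Int)
          = (xs.length : Int) - (pvL xs + 1) := by
        simp [List.length_drop]
        omega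
      cases hfa : (xs.drop (pvL xs + 1).toNat).findIdx? pvIsAssist with
      | some k =>
        have hFx : pvF xs = some (pvL xs + 1 + (k : Int)) := by simp [pvF, hfa]
        simp [ht, hFx, hFapp, hfa]
      | none =>
        have hFx : pvF xs = none := by simp [pvF, hfa]
        by_cases ha : pvIsAssist x
        · have : pvL xs + 1 + ((0 + (xs.drop (pvL xs + 1).toNat).length : Nat) : Int)
              = (xs.length : Int) := by push_cast; omega
          simp [ht, ha, hFx, hFapp, hfa, List.findIdx?_singleton]
          omega
        · simp [ht, ha, hFx, hFapp, hfa, List.findIdx?_singleton]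

theorem pvFirstAssistLoop_eq (ys : List (List (String × String))) (s : Int) :
    pvFirstAssistLoop (PySem.List.enumerate ys s) =
      match ys.findIdx? pvIsAssist with
      | some k => s + (k : Int)
      | none => -1 := by
  induction ys generalizing s with
  | nil => simp [pvFirstAssistLoop, PySem.List.enumerate_nil]
  | cons y t ih =>
    rw [PySem.List.enumerate_cons]
    by_cases ha : pvIsAssist y
    · simp [pvFirstAssistLoop, ha, List.findIdx?_cons]
    · rw [List.findIdx?_cons]
      simp only [pvFirstAssistLoop, ha, cond_false]
      rw [if_neg (by simp [ha]), ih]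
      cases h : t.findIdx? pvIsAssist with
      | some k =>
        simp only [h, Option.map_some]
        push_cast
        ring
      | none => simp [h]

-- ===== VERDICT (by name: the statement is the Claim_ definition above) =====
theorem trim_conversation_spec : Claim_equal_trim_conversation := by
  intro sd _
  unfold Spec_trim_conversation trim_conversation trim_conversation_alt
  simp only []
  rw [pvMB_eq]
  have hpvL : (PySem.List.enumerate (PySem.List.slice sd (some 3) none) 0).foldl
      (fun acc p => if pvIsTrans p.2 then p.1 else acc) (-1 : Int)
        = pvL (PySem.List.slice sd (some 3) none) := rfl
  rw [hpvL]
  set xs := PySem.List.slice sd (some 3) none with hxs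
  obtain ⟨h1, h2, h3⟩ := pvL_bounds xs
  have hstart : (if pvL xs ≠ -1 then pvL xs + 1 else 0) = pvL xs + 1 := by
    split_ifs with h <;> omega
  rw [hstart, PySem.List.slice_from _ (by omega : (0:Int) ≤ pvL xs + 1),
    pvFirstAssistLoop_eq]
  cases hfa : (xs.drop (pvL xs + 1).toNat).findIdx? pvIsAssist with
  | none =>
    have hF : pvF xs = none := by simp [pvF, hfa]
    simp only [hF]
    rw [PySem.List.slice_from _ (by omega : (0:Int) ≤ pvL xs + 1)]
    simp
  | some k =>
    have hF : pvF xs = some (pvL xs + 1 + (k : Int)) := by simp [pvF, hfa]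
    simp only [hF]
    rw [if_pos (by omega : (0 : Int) + (k : Int) ≠ -1),
      PySem.List.slice_from _ (by omega : (0:Int) ≤ (0:Int) + (k : Int)),
      PySem.List.slice_from _ (by omega : (0:Int) ≤ pvL xs + 1 + (k : Int)),
      List.drop_drop]
    have : (pvL xs + 1).toNat + ((0 : Int) + (k:Int)).toNat = (pvL xs + 1 + (k:Int)).toNat := by
      omega
    rw [this]
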